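-- pv_equiv track=rewrite | github.com/allanRoberto/revesbot-final | apps/api/services/pattern_score_training_service.py | _canonical_pattern_id
-- ===== SOURCE A (Python) =====
-- from typing import Any, Callable, Dict, List
--
-- def _canonical_pattern_id(raw_pattern_id: str, known_pattern_ids: List[str]) -> str:
--     raw = str(raw_pattern_id or "").strip()
--     if not raw:
--         return ""
--     if raw in known_pattern_ids:
--         return raw
--     matches = [pid for pid in known_pattern_ids if raw.startswith(f"{pid}_")]
--     if not matches:
--         return raw
--     matches.sort(key=len, reverse=True)
--     return matches[0]
-- ===== SOURCE B (Python) =====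
-- def _canonical_pattern_id(raw_pattern_id, known_pattern_ids):
--     raw = str(raw_pattern_id or "").strip()
--     if not raw:
--         return ""
--     if raw in known_pattern_ids:
--         return raw
--     best = None
--     for pid in known_pattern_ids:
--         if raw.startswith(pid + "_") and (best is None or len(pid) > len(best)):
--             best = pid
--     return raw if best is None else best
-- ===== Notes on version B (the rewrite author's own statement) =====
-- stated objective: alternative
-- what changed: Replaces A's filter-into-a-list, length-sort and take-first-element by a single left-to-right pass over known_pattern_ids that keeps the longest pid whose pid+'_' is a prefix of raw.
import Mathlib
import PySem

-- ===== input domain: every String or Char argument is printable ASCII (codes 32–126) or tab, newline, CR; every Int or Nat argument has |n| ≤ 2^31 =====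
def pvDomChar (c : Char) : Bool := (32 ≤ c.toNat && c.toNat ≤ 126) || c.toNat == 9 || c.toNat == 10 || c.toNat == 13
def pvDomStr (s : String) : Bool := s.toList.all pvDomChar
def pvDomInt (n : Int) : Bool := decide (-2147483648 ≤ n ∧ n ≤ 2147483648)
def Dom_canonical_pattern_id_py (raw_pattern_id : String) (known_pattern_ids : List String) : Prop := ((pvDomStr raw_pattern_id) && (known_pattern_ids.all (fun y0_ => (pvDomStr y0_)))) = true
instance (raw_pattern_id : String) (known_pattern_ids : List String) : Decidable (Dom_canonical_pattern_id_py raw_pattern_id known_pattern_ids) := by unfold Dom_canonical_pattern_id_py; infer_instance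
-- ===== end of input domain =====

-- B replaces A's build-filtered-list + length-sort + take-head by a single fold over the
-- known ids that keeps the longest `pid` with `pid + "_"` a prefix of raw (objective: alternative).

-- ===== PORT A =====
def canonical_pattern_id_py (raw_pattern_id : String) (known_pattern_ids : List String) : String :=
  -- `str(raw_pattern_id or "")` is the identity on str arguments
  let raw := PySem.Str.strip raw_pattern_id
  if raw = "" then ""
  else if raw ∈ known_pattern_ids then raw
  else
    let ms := known_pattern_ids.filter (fun pid => PySem.Str.startswith raw (pid ++ "_"))
    if ms = [] then raw
    else
      -- matches.sort(key=len, reverse=True); return matches[0]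
      PySem.List.pyGetD (PySem.List.sorted ms (fun p => p.toList.length) true) 0 ""

-- ===== PORT B =====
def canonical_pattern_id_py_alt (raw_pattern_id : String) (known_pattern_ids : List String) : String :=
  let raw := PySem.Str.strip raw_pattern_id
  if raw = "" then ""
  else if raw ∈ known_pattern_ids then raw
  else
    let best := known_pattern_ids.foldl
      (fun (best : Option String) pid =>
        if PySem.Str.startswith raw (pid ++ "_") &&
           (match best with
            | none => true
            | some b => decide (b.toList.length < pid.toList.length))
        then some pid else best) none
    match best with
    | none => raw
    | some b => b

-- ===== PRECONDITION & SPEC =====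
def Spec_canonical_pattern_id_py (raw_pattern_id : String) (known_pattern_ids : List String) (out : String) : Prop := out = canonical_pattern_id_py_alt raw_pattern_id known_pattern_ids
instance (raw_pattern_id : String) (known_pattern_ids : List String) (out : String) : Decidable (Spec_canonical_pattern_id_py raw_pattern_id known_pattern_ids out) := by unfold Spec_canonical_pattern_id_py; infer_instance

-- ===== CLAIM (what is proved, stated in full; the proofs are below) =====
def Claim_equal_canonical_pattern_id_py : Prop := ∀ (raw_pattern_id : String) (known_pattern_ids : List String), Dom_canonical_pattern_id_py raw_pattern_id known_pattern_ids → Spec_canonical_pattern_id_py raw_pattern_id known_pattern_ids (canonical_pattern_id_py raw_pattern_id known_pattern_ids)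

-- ===== LEMMAS AND PROOFS =====

-- Two matching pids of equal length are the same string: each equals raw.take(length).
theorem pv_match_unique (raw p q : String)
    (hp : PySem.Str.startswith raw (p ++ "_") = true)
    (hq : PySem.Str.startswith raw (q ++ "_") = true)
    (hlen : p.toList.length = q.toList.length) : p = q := by
  simp only [PySem.Str.startswith_eq, PySem.Chars.startswith_iff, String.toList_append] at hp hq
  have hp' : p.toList <+: raw.toList := ((List.prefix_append _ _).trans hp)
  have hq' : q.toList <+: raw.toList := ((List.prefix_append _ _).trans hq)
  have hpq : p.toList = q.toList := by
    rw [List.prefix_iff_eq_take.mp hp', List.prefix_iff_eq_take.mp hq', hlen]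
  have := congrArg String.ofList hpq
  simpa using this

-- Invariant of B's fold, for an arbitrary Bool test p on the pids.
theorem pv_fold_inv (p : String → Bool) (l : List String) : ∀ (acc : Option String),
    match l.foldl
      (fun (best : Option String) pid =>
        if p pid &&
           (match best with
            | none => true
            | some b => decide (b.toList.length < pid.toList.length))
        then some pid else best) acc with
    | none => acc = none ∧ l.filter p = []
    | some b =>
        (b ∈ l.filter p ∨ acc = some b) ∧
        (∀ x ∈ l.filter p, x.toList.length ≤ b.toList.length) ∧
        (∀ a, acc = some a → a.toList.length ≤ b.toList.length) := by
  induction l with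
  | nil => intro acc; cases acc <;> simp
  | cons x xs ih =>
    intro acc
    simp only [List.foldl_cons]
    have h := ih (if p x &&
           (match acc with
            | none => true
            | some b => decide (b.toList.length < x.toList.length))
        then some x else acc)
    by_cases hx : p x = true
    · -- x passes the test
      cases acc with
      | none =>
        simp only [hx, Bool.true_and, if_pos] at h ⊢
        rcases hr : xs.foldl _ (some x) with _ | b
        · rw [hr] at h; exact absurd h.1 (by simp)
        · rw [hr] at h
          simp only [List.filter_cons, hx, if_pos]
          refine ⟨?_, ?_, fun a ha => by cases ha⟩
          · rcases h.1 with hm | he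
            · exact Or.inl (List.mem_cons_of_mem _ hm)
            · injection he with he'; exact Or.inl (by simp [he'])
          · intro y hy
            rcases List.mem_cons.mp hy with rfl | hy'
            · exact h.2.2 y rfl
            · exact h.2.1 y hy'
      | some a =>
        by_cases hlt : a.toList.length < x.toList.length
        · simp only [hx, hlt, decide_true, Bool.true_and, if_pos] at h ⊢
          rcases hr : xs.foldl _ (some x) with _ | b
          · rw [hr] at h; exact absurd h.1 (by simp)
          · rw [hr] at h
            simp only [List.filter_cons, hx, if_pos]
            refine ⟨?_, ?_, ?_⟩
            · rcases h.1 with hm | he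
              · exact Or.inl (List.mem_cons_of_mem _ hm)
              · injection he with he'; exact Or.inl (by simp [he'])
            · intro y hy
              rcases List.mem_cons.mp hy with rfl | hy'
              · exact h.2.2 y rfl
              · exact h.2.1 y hy'
            · intro a' ha'
              injection ha' with ha''
              subst ha''
              exact le_trans (Nat.le_of_lt hlt) (h.2.2 x rfl)
        · simp only [hx, hlt, decide_false, Bool.and_false,
            Bool.false_eq_true, not_false_eq_true, if_neg] at h ⊢
          rcases hr : xs.foldl _ (some a) with _ | b
          · rw [hr] at h; exact absurd h.1 (by simp)
          · rw [hr] at h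
            simp only [List.filter_cons, hx, if_pos]
            refine ⟨?_, ?_, h.2.2⟩
            · rcases h.1 with hm | he
              · exact Or.inl (List.mem_cons_of_mem _ hm)
              · exact Or.inr he
            intro y hy
            rcases List.mem_cons.mp hy with rfl | hy'
            · exact le_trans (Nat.le_of_not_lt hlt) (h.2.2 a rfl)
            · exact h.2.1 y hy'
    · -- x fails the test: accumulator passes through
      have hx' : p x = false := by simpa using hx
      simp only [hx', Bool.false_and, Bool.false_eq_true, not_false_eq_true, if_neg] at h ⊢
      rcases hr : xs.foldl _ acc with _ | b
      · rw [hr] at h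
        refine ⟨h.1, ?_⟩
        simp only [List.filter_cons, hx']
        exact h.2
      · rw [hr] at h
        refine ⟨?_, ?_, h.2.2⟩
        · simpa only [List.filter_cons, hx'] using h.1
        · simpa only [List.filter_cons, hx'] using h.2.1

theorem canonical_pattern_id_py_eq (raw_pattern_id : String) (known_pattern_ids : List String) :
    canonical_pattern_id_py raw_pattern_id known_pattern_ids
      = canonical_pattern_id_py_alt raw_pattern_id known_pattern_ids := by
  unfold canonical_pattern_id_py canonical_pattern_id_py_alt
  by_cases h0 : PySem.Str.strip raw_pattern_id = ""
  · simp [h0]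
  · simp only [h0, if_false]
    by_cases h1 : PySem.Str.strip raw_pattern_id ∈ known_pattern_ids
    · simp [h1]
    · simp only [h1, if_false]
      have hinv := pv_fold_inv
        (fun pid => PySem.Str.startswith (PySem.Str.strip raw_pattern_id) (pid ++ "_"))
        known_pattern_ids none
      by_cases h2 : known_pattern_ids.filter
          (fun pid => PySem.Str.startswith (PySem.Str.strip raw_pattern_id) (pid ++ "_")) = []
      · -- no match: both return raw
        rcases hr : known_pattern_ids.foldl _ (none : Option String) with _ | b
        · simp only [h2]
          simp
        · rw [hr] at hinv
          rcases hinv.1 with hmem | he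
          · rw [h2] at hmem; cases hmem
          · cases he
      · -- some match: A's sorted head = B's fold result
        rcases hr : known_pattern_ids.foldl _ (none : Option String) with _ | b
        · rw [hr] at hinv; exact absurd hinv.2 h2
        · rw [hr] at hinv
          have hb := hinv.1
          have hbmem : b ∈ known_pattern_ids.filter
              (fun pid => PySem.Str.startswith (PySem.Str.strip raw_pattern_id) (pid ++ "_")) := by
            rcases hb with hmem | he
            · exact hmem
            · cases he
          rcases hs : PySem.List.sorted (known_pattern_ids.filter
              (fun pid => PySem.Str.startswith (PySem.Str.strip raw_pattern_id) (pid ++ "_")))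
              (fun p => p.toList.length) true with _ | ⟨m, t⟩
          · exact absurd ((PySem.List.sorted_eq_nil_iff _ _ _).mp hs) h2
          · have hmmem : m ∈ known_pattern_ids.filter
                (fun pid => PySem.Str.startswith (PySem.Str.strip raw_pattern_id) (pid ++ "_")) := by
              have hperm := PySem.List.sorted_perm (known_pattern_ids.filter
                (fun pid => PySem.Str.startswith (PySem.Str.strip raw_pattern_id) (pid ++ "_")))
                (fun p => p.toList.length) true
              rw [hs] at hperm
              exact hperm.mem_iff.mp List.mem_cons_self
            have hmmax : ∀ y ∈ known_pattern_ids.filter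
                (fun pid => PySem.Str.startswith (PySem.Str.strip raw_pattern_id) (pid ++ "_")),
                y.toList.length ≤ m.toList.length :=
              PySem.List.key_head_sorted_rev_ge _ _ hs
            have hPb := List.of_mem_filter hbmem
            have hPm := List.of_mem_filter hmmem
            have hlen : m.toList.length = b.toList.length :=
              Nat.le_antisymm (hinv.2.1 m hmmem) (hmmax b hbmem)
            have hmb : m = b := pv_match_unique _ m b hPm hPb hlen
            simp only [if_neg h2, PySem.List.pyGetD_zero_cons]
            exact hmb

-- ===== VERDICT (by name: the statement is the Claim_ definition above) =====
theorem canonical_pattern_id_py_spec : Claim_equal_canonical_pattern_id_py := by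
  intro raw_pattern_id known_pattern_ids _
  exact canonical_pattern_id_py_eq raw_pattern_id known_pattern_ids
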